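-- pv_equiv track=rewrite | github.com/tmoson/aoc2020 | python/day3.py | right_x_down_y
-- ===== SOURCE A (Python) =====
-- def right_x_down_y(nav, horizontal_move, vertical_move):
--     endx = len(nav[0])
--     endy = len(nav)
--     x = 0
--     y = 0
--     trees = 0
--     while y < endy:
--         if x < endx:
--             if nav[y][x] == '#':
--                 trees += 1
--                 x += horizontal_move
--                 y += vertical_move
--             else:
--                 x += horizontal_move
--                 y += vertical_move
--         elif nav[y][x % endx] == '#':
--             trees += 1
--             x += horizontal_move
--             y += vertical_move
--         else:
--             x += horizontal_move
--             y += vertical_move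
--     return trees
-- ===== SOURCE B (Python) =====
-- def right_x_down_y(nav, horizontal_move, vertical_move):
--     endx = len(nav[0])
--
--     def count(rows, x):
--         if not rows:
--             return 0
--         hit = rows[0][x if x < endx else x % endx] == '#'
--         return hit + count(rows[vertical_move:], x + horizontal_move)
--
--     return count(nav, 0)
-- ===== Notes on version B (the rewrite author's own statement) =====
-- stated objective: alternative
-- what changed: Replaces the iterative while loop that maintains x/y/trees accumulators and four duplicated branches by a structural recursion that consumes the grid itself, slicing off vertical_move rows per call, tracking only the column and summing hits on the way back.
import Mathlib
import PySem

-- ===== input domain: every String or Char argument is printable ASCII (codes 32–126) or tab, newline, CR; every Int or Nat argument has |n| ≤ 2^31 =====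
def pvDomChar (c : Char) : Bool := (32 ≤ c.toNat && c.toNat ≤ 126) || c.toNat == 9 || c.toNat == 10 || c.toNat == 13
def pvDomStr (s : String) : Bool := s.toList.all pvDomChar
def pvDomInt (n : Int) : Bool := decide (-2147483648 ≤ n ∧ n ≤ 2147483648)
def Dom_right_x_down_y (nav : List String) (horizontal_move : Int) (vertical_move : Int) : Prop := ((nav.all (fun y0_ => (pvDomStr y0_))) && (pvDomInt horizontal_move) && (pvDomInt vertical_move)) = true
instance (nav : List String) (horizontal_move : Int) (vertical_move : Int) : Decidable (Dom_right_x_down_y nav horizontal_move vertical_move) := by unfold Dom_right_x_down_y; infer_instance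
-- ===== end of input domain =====

-- B replaces A's while loop maintaining x/y/trees accumulators by a structural recursion that
-- consumes the grid itself, slicing off vertical_move rows per call (objective: alternative).

-- ===== PORT A =====
-- the while loop, as fuel recursion over the state (x, y, trees); fuel = nav.length
-- bounds the iteration count whenever vertical_move ≥ 1 (Pre_ guarantees that)
def goA (nav : List String) (h v endx endy : Int) : Nat → Int → Int → Int → Int
  | 0, _, _, trees => trees
  | fuel+1, x, y, trees =>
    if y < endy then
      let row := (PySem.List.pyGet? nav y).getD ""
      if x < endx then
        if PySem.Str.pyGet? row x = some '#' then
          goA nav h v endx endy fuel (x + h) (y + v) (trees + 1)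
        else
          goA nav h v endx endy fuel (x + h) (y + v) trees
      else if PySem.Str.pyGet? row (PySem.Int.mod x endx) = some '#' then
        goA nav h v endx endy fuel (x + h) (y + v) (trees + 1)
      else
        goA nav h v endx endy fuel (x + h) (y + v) trees
    else trees

def right_x_down_y (nav : List String) (horizontal_move : Int) (vertical_move : Int) : Int :=
  let endx := PySem.Str.len ((PySem.List.pyGet? nav 0).getD "")
  let endy := PySem.List.len nav
  goA nav horizontal_move vertical_move endx endy nav.length 0 0 0

-- ===== PORT B =====
-- Source B's inner 'count': recursion on the remaining rows, slicing off vertical_move rows per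
-- call; fuel (= nav.length at the top call) only makes the recursion total in Lean
def goB (h v endx : Int) : Nat → List String → Int → Int
  | 0, _, _ => 0
  | fuel+1, rows, x =>
    if rows = [] then 0
    else
      let hit := PySem.Str.pyGet? ((PySem.List.pyGet? rows 0).getD "")
                   (if x < endx then x else PySem.Int.mod x endx) = some '#'
      (if hit then 1 else 0) + goB h v endx fuel (PySem.List.slice rows (some v) none) (x + h)

def right_x_down_y_alt (nav : List String) (horizontal_move : Int) (vertical_move : Int) : Int :=
  let endx := PySem.Str.len ((PySem.List.pyGet? nav 0).getD "")
  goB horizontal_move vertical_move endx nav.length nav 0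

-- ===== PRECONDITION & SPEC =====
-- Pre_ = exactly the inputs on which Python A returns: nav nonempty (else nav[0] raises
-- IndexError), vertical_move > 0 (else the while loop never terminates), and every visited
-- character index is valid (no IndexError / ZeroDivisionError at any executed step).
def Pre_right_x_down_y (nav : List String) (horizontal_move : Int) (vertical_move : Int) : Prop :=
  nav ≠ [] ∧ 0 < vertical_move ∧
  ∀ i : Nat, i < nav.length → ((i : Int) * vertical_move < (nav.length : Int) →
    (let endx := PySem.Str.len ((PySem.List.pyGet? nav 0).getD "")
     let row := (PySem.List.pyGet? nav ((i : Int) * vertical_move)).getD ""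
     let x := (i : Int) * horizontal_move
     if x < endx then (PySem.Str.pyGet? row x).isSome = true
     else endx ≠ 0 ∧ (PySem.Str.pyGet? row (PySem.Int.mod x endx)).isSome = true))

instance (nav : List String) (horizontal_move : Int) (vertical_move : Int) : Decidable (Pre_right_x_down_y nav horizontal_move vertical_move) := by unfold Pre_right_x_down_y; infer_instance

def pvWitness_right_x_down_y : List String × Int × Int := (["#..#", ".#.."], 3, 1)

def Spec_right_x_down_y (nav : List String) (horizontal_move : Int) (vertical_move : Int) (out : Int) : Prop := out = right_x_down_y_alt nav horizontal_move vertical_move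
instance (nav : List String) (horizontal_move : Int) (vertical_move : Int) (out : Int) : Decidable (Spec_right_x_down_y nav horizontal_move vertical_move out) := by unfold Spec_right_x_down_y; infer_instance

-- ===== CLAIM (what is proved, stated in full; the proofs are below) =====
def Claim_equal_right_x_down_y : Prop := ∀ (nav : List String) (horizontal_move : Int) (vertical_move : Int), Dom_right_x_down_y nav horizontal_move vertical_move → Pre_right_x_down_y nav horizontal_move vertical_move → Spec_right_x_down_y nav horizontal_move vertical_move (right_x_down_y nav horizontal_move vertical_move)

-- ===== LEMMAS AND PROOFS =====

-- loop-correspondence: A's while loop from state (x, y, t) equals t plus B's recursive count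
-- over the rows still below y, provided the same fuel covers the remaining rows
lemma goA_goB (nav : List String) (h v endx : Int) (hv : 0 < v) :
    ∀ (fuel : Nat) (x y t : Int), 0 ≤ y → nav.length ≤ y.toNat + fuel →
      goA nav h v endx (nav.length : Int) fuel x y t
        = t + goB h v endx fuel (nav.drop y.toNat) x := by
  intro fuel
  induction fuel with
  | zero =>
    intro x y t hy hfuel
    have : nav.drop y.toNat = [] := List.drop_eq_nil_of_le (by omega)
    simp [goA, goB]
  | succ fuel ih =>
    intro x y t hy hfuel
    by_cases hlt : y < (nav.length : Int)
    · have hyn : y.toNat < nav.length := by omega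
      have hne : nav.drop y.toNat ≠ [] := by
        simp [List.drop_eq_nil_iff]; omega
      have hrow : PySem.List.pyGet? (nav.drop y.toNat) 0 = PySem.List.pyGet? nav y := by
        rw [PySem.List.pyGet?_zero, PySem.List.pyGet?_of_nonneg _ hy]
        simp [List.getElem?_drop]
      have hdrop : PySem.List.slice (nav.drop y.toNat) (some v) none = nav.drop (y + v).toNat := by
        rw [PySem.List.slice_from _ (le_of_lt hv), List.drop_drop]
        congr 1; omega
      have hIH : ∀ t' : Int,
          goA nav h v endx (nav.length : Int) fuel (x + h) (y + v) t'
            = t' + goB h v endx fuel (nav.drop (y + v).toNat) (x + h) := by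
        intro t'
        exact ih (x + h) (y + v) t' (by omega) (by omega)
      simp only [goA, goB, if_pos hlt, if_neg hne, hrow, hdrop]
      split_ifs with h1 h2 h3 <;> rw [hIH] <;> omega
    · have : nav.drop y.toNat = [] := List.drop_eq_nil_of_le (by omega)
      simp [goA, goB, if_neg hlt, this]

-- ===== VERDICT (by name: the statement is the Claim_ definition above) =====
theorem right_x_down_y_spec : Claim_equal_right_x_down_y := by
  intro nav h v _ hpre
  obtain ⟨-, hv, -⟩ := hpre
  unfold Spec_right_x_down_y right_x_down_y right_x_down_y_alt
  have hlen : PySem.List.len nav = (nav.length : Int) := PySem.List.len_eq nav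
  have := goA_goB nav h v (PySem.Str.len ((PySem.List.pyGet? nav 0).getD "")) hv
      nav.length 0 0 0 le_rfl (by omega)
  simpa [hlen] using this
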